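-- pv_equiv track=rewrite | github.com/kamran-11003/AutoTest | test_generator/generators/use_case_generator.py | _detect_form_type
-- ===== SOURCE A (Python) =====
-- from typing import Dict, List, Any
--
-- def _detect_form_type(form: Dict) -> str:
--     """Detect form type based on field names and structure"""
--     inputs = form.get('inputs', [])
--     field_names = [(inp.get('name') or '').lower() for inp in inputs]
--
--     # Contact form detection
--     if any(name in field_names for name in ['message', 'subject', 'inquiry']):
--         return 'contact'
--
--     # Registration form detection
--     if any(name in field_names for name in ['password', 'confirm_password', 'username']):
--         return 'registration'
--
--     # Search form detection
--     if any(name in field_names for name in ['search', 'q', 'query']):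
--         return 'search'
--
--     return 'generic'
-- ===== SOURCE B (Python) =====
-- _KEYWORD_RANK = {
--     'message': 0, 'subject': 0, 'inquiry': 0,
--     'password': 1, 'confirm_password': 1, 'username': 1,
--     'search': 2, 'q': 2, 'query': 2,
-- }
-- _TYPES = ['contact', 'registration', 'search']
--
--
-- def _detect_form_type(form):
--     """Single pass over the form's inputs keeping the best (lowest) priority
--     rank seen, with a keyword->rank dictionary; early exit on rank 0."""
--     best = 3
--     for inp in form.get('inputs', []):
--         name = (inp.get('name') or '').lower()
--         rank = _KEYWORD_RANK.get(name, 3)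
--         if rank < best:
--             best = rank
--             if best == 0:
--                 break
--     return _TYPES[best] if best < 3 else 'generic'
-- ===== Notes on version B (the rewrite author's own statement) =====
-- stated objective: alternative
-- what changed: Inverts the loop: instead of A's three staged any/in scans over the field-name list, B makes a single pass over the inputs, looking each lowercased name up in a keyword->priority dictionary and keeping the minimum rank (early exit on rank 0), then maps the rank back to a form type.
import Mathlib
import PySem

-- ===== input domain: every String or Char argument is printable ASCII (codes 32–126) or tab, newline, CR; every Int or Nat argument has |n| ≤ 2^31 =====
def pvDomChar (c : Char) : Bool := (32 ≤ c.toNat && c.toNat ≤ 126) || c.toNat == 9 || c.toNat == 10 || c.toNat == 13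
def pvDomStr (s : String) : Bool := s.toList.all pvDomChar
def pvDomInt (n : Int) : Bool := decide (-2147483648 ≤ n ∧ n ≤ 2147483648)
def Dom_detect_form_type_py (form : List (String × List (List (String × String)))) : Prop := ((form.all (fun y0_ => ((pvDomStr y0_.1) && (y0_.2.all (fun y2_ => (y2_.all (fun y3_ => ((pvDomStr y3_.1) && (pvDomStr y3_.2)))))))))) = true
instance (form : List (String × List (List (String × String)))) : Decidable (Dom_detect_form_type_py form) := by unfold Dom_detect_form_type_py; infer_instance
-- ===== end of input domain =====

-- B inverts the loop: one pass over the inputs keeping the minimum keyword-priority rank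
-- (dictionary lookup, early exit on rank 0), instead of A's three staged any/in scans over
-- the field-name list (objective: alternative).

-- ===== PORT A =====
-- inp.get('name') or '' : None and '' are both falsy, so both yield ''
def pyNameOrEmpty (inp : List (String × String)) : String :=
  match (PySem.Dict.mk inp).get? "name" with
  | some s => if s == "" then "" else s
  | none => ""

def detect_form_type_py (form : List (String × List (List (String × String)))) : String :=
  let inputs := (PySem.Dict.mk form).getD "inputs" []
  let field_names := inputs.map (fun inp => PySem.Str.lower (pyNameOrEmpty inp))
  if ["message", "subject", "inquiry"].any (fun name => field_names.contains name) then "contact"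
  else if ["password", "confirm_password", "username"].any (fun name => field_names.contains name) then "registration"
  else if ["search", "q", "query"].any (fun name => field_names.contains name) then "search"
  else "generic"

-- ===== PORT B =====
def pvKeywordRank : PySem.Dict String Int :=
  PySem.Dict.mk
    [("message", 0), ("subject", 0), ("inquiry", 0),
     ("password", 1), ("confirm_password", 1), ("username", 1),
     ("search", 2), ("q", 2), ("query", 2)]

def pvTypes : List String := ["contact", "registration", "search"]

def pvBestLoop (inputs : List (List (String × String))) (best : Int) : Int :=
  match inputs with
  | [] => best
  | inp :: rest =>
    let name := PySem.Str.lower (pyNameOrEmpty inp)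
    let rank := pvKeywordRank.getD name 3
    let best' := if rank < best then rank else best
    if best' == 0 then best' else pvBestLoop rest best'

def detect_form_type_py_alt (form : List (String × List (List (String × String)))) : String :=
  let best := pvBestLoop ((PySem.Dict.mk form).getD "inputs" []) 3
  if best < 3 then (PySem.List.pyGet? pvTypes best).getD "" else "generic"

-- ===== PRECONDITION & SPEC =====
def Spec_detect_form_type_py (form : List (String × List (List (String × String)))) (out : String) : Prop := out = detect_form_type_py_alt form
instance (form : List (String × List (List (String × String)))) (out : String) : Decidable (Spec_detect_form_type_py form out) := by unfold Spec_detect_form_type_py; infer_instance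

-- ===== CLAIM (what is proved, stated in full; the proofs are below) =====
def Claim_equal_detect_form_type_py : Prop := ∀ (form : List (String × List (List (String × String)))), Dom_detect_form_type_py form → Spec_detect_form_type_py form (detect_form_type_py form)

-- ===== LEMMAS AND PROOFS =====
lemma rank_eq (n : String) : pvKeywordRank.getD n 3 =
    if n = "message" ∨ n = "subject" ∨ n = "inquiry" then 0
    else if n = "password" ∨ n = "confirm_password" ∨ n = "username" then 1
    else if n = "search" ∨ n = "q" ∨ n = "query" then 2
    else 3 := by
  simp only [pvKeywordRank, PySem.Dict.getD, PySem.Dict.get?_mk_cons, beq_iff_eq]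
  split_ifs <;> simp_all [PySem.Dict.get?, eq_comm]

lemma rank_nonneg (n : String) : 0 ≤ pvKeywordRank.getD n 3 := by
  rw [rank_eq]; split_ifs <;> norm_num

lemma rank_le0_of (n : String) (h : n = "message" ∨ n = "subject" ∨ n = "inquiry") :
    pvKeywordRank.getD n 3 ≤ 0 := by
  rw [rank_eq, if_pos h]

lemma rank_le1_of (n : String) (h : n = "password" ∨ n = "confirm_password" ∨ n = "username") :
    pvKeywordRank.getD n 3 ≤ 1 := by
  rw [rank_eq]; split_ifs <;> norm_num

lemma rank_le2_of (n : String) (h : n = "search" ∨ n = "q" ∨ n = "query") :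
    pvKeywordRank.getD n 3 ≤ 2 := by
  rw [rank_eq]; split_ifs <;> norm_num

lemma pvBestLoop_le_iff (inputs : List (List (String × String))) (best k : Int)
    (hb : 0 ≤ best) (hk : 0 ≤ k) :
    pvBestLoop inputs best ≤ k ↔
      (best ≤ k ∨ ∃ inp ∈ inputs, pvKeywordRank.getD (PySem.Str.lower (pyNameOrEmpty inp)) 3 ≤ k) := by
  induction inputs generalizing best with
  | nil => simp [pvBestLoop]
  | cons inp rest ih =>
    simp only [pvBestLoop, beq_iff_eq]
    set r := pvKeywordRank.getD (PySem.Str.lower (pyNameOrEmpty inp)) 3 with hr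
    have hr0 : 0 ≤ r := rank_nonneg _
    by_cases hrb : r < best
    · rw [if_pos hrb]
      by_cases hz : r = 0
      · rw [if_pos hz]
        constructor
        · intro _; right; exact ⟨inp, List.mem_cons_self, by omega⟩
        · intro _; omega
      · rw [if_neg hz, ih _ (by omega)]
        simp only [List.mem_cons]
        constructor
        · rintro (h | ⟨i, hi, hle⟩)
          · right; exact ⟨inp, Or.inl rfl, h⟩
          · right; exact ⟨i, Or.inr hi, hle⟩
        · rintro (h | ⟨i, rfl | hi, hle⟩)
          · left; omega
          · left; exact hle
          · right; exact ⟨i, hi, hle⟩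
    · rw [if_neg hrb]
      by_cases hz : best = 0
      · rw [if_pos hz]
        constructor
        · intro _; left; omega
        · intro _; omega
      · rw [if_neg hz, ih _ hb]
        simp only [List.mem_cons]
        constructor
        · rintro (h | ⟨i, hi, hle⟩)
          · left; exact h
          · right; exact ⟨i, Or.inr hi, hle⟩
        · rintro (h | ⟨i, rfl | hi, hle⟩)
          · left; exact h
          · left; omega
          · right; exact ⟨i, hi, hle⟩

lemma pvBestLoop_nonneg (inputs : List (List (String × String))) (best : Int) (hb : 0 ≤ best) :
    0 ≤ pvBestLoop inputs best := by
  induction inputs generalizing best with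
  | nil => simpa [pvBestLoop]
  | cons inp rest ih =>
    simp only [pvBestLoop, beq_iff_eq]
    have := rank_nonneg (PySem.Str.lower (pyNameOrEmpty inp))
    by_cases hrb : pvKeywordRank.getD (PySem.Str.lower (pyNameOrEmpty inp)) 3 < best
    · rw [if_pos hrb]
      by_cases hz : pvKeywordRank.getD (PySem.Str.lower (pyNameOrEmpty inp)) 3 = 0
      · rw [if_pos hz]; omega
      · rw [if_neg hz]; exact ih _ (by omega)
    · rw [if_neg hrb]
      by_cases hz : best = 0
      · rw [if_pos hz]; omega
      · rw [if_neg hz]; exact ih _ hb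

-- ===== VERDICT (by name: the statement is the Claim_ definition above) =====
theorem detect_form_type_py_spec : Claim_equal_detect_form_type_py := by
  intro form _
  unfold Spec_detect_form_type_py detect_form_type_py detect_form_type_py_alt
  set inputs := (PySem.Dict.mk form).getD "inputs" [] with hin
  set fn := inputs.map (fun inp => PySem.Str.lower (pyNameOrEmpty inp)) with hfn
  set b := pvBestLoop inputs 3 with hb
  have hb0 : 0 ≤ b := pvBestLoop_nonneg _ _ (by norm_num)
  have key : ∀ k : Int, 0 ≤ k → k < 3 → (b ≤ k ↔ ∃ inp ∈ inputs,
      pvKeywordRank.getD (PySem.Str.lower (pyNameOrEmpty inp)) 3 ≤ k) := by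
    intro k hk hk3
    rw [hb, pvBestLoop_le_iff _ _ _ (by norm_num) hk]
    constructor
    · rintro (h | h)
      · omega
      · exact h
    · exact Or.inr
  have memfn : ∀ s : String, s ∈ fn ↔ ∃ inp ∈ inputs, PySem.Str.lower (pyNameOrEmpty inp) = s := by
    intro s; rw [hfn]; simp [List.mem_map]
  have h0 : b ≤ 0 ↔ ("message" ∈ fn ∨ "subject" ∈ fn ∨ "inquiry" ∈ fn) := by
    rw [key 0 (by norm_num) (by norm_num)]
    simp only [memfn]
    constructor
    · rintro ⟨i, hi, hle⟩
      rw [rank_eq] at hle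
      split_ifs at hle with c1 c2 c3 <;> try omega
      rcases c1 with h|h|h
      · exact Or.inl ⟨i, hi, h⟩
      · exact Or.inr (Or.inl ⟨i, hi, h⟩)
      · exact Or.inr (Or.inr ⟨i, hi, h⟩)
    · rintro (⟨i, hi, h⟩ | ⟨i, hi, h⟩ | ⟨i, hi, h⟩) <;>
        exact ⟨i, hi, rank_le0_of _ (by tauto)⟩
  have h1 : b ≤ 1 ↔ (("message" ∈ fn ∨ "subject" ∈ fn ∨ "inquiry" ∈ fn) ∨
      ("password" ∈ fn ∨ "confirm_password" ∈ fn ∨ "username" ∈ fn)) := by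
    rw [key 1 (by norm_num) (by norm_num)]
    simp only [memfn]
    constructor
    · rintro ⟨i, hi, hle⟩
      rw [rank_eq] at hle
      split_ifs at hle with c1 c2 c3 <;> try omega
      · rcases c1 with h|h|h
        · exact Or.inl (Or.inl ⟨i, hi, h⟩)
        · exact Or.inl (Or.inr (Or.inl ⟨i, hi, h⟩))
        · exact Or.inl (Or.inr (Or.inr ⟨i, hi, h⟩))
      · rcases c2 with h|h|h
        · exact Or.inr (Or.inl ⟨i, hi, h⟩)
        · exact Or.inr (Or.inr (Or.inl ⟨i, hi, h⟩))
        · exact Or.inr (Or.inr (Or.inr ⟨i, hi, h⟩))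
    · rintro ((⟨i, hi, h⟩ | ⟨i, hi, h⟩ | ⟨i, hi, h⟩) | (⟨i, hi, h⟩ | ⟨i, hi, h⟩ | ⟨i, hi, h⟩)) <;>
        refine ⟨i, hi, ?_⟩ <;>
        first
        | (have := rank_le0_of _ (Or.inl h); omega)
        | (have := rank_le0_of _ (Or.inr (Or.inl h)); omega)
        | (have := rank_le0_of _ (Or.inr (Or.inr h)); omega)
        | (have := rank_le1_of _ (Or.inl h); omega)
        | (have := rank_le1_of _ (Or.inr (Or.inl h)); omega)
        | (have := rank_le1_of _ (Or.inr (Or.inr h)); omega)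
  have h2 : b ≤ 2 ↔ ((("message" ∈ fn ∨ "subject" ∈ fn ∨ "inquiry" ∈ fn) ∨
      ("password" ∈ fn ∨ "confirm_password" ∈ fn ∨ "username" ∈ fn)) ∨
      ("search" ∈ fn ∨ "q" ∈ fn ∨ "query" ∈ fn)) := by
    rw [key 2 (by norm_num) (by norm_num)]
    simp only [memfn]
    constructor
    · rintro ⟨i, hi, hle⟩
      rw [rank_eq] at hle
      split_ifs at hle with c1 c2 c3 <;> try omega
      · rcases c1 with h|h|h
        · exact Or.inl (Or.inl (Or.inl ⟨i, hi, h⟩))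
        · exact Or.inl (Or.inl (Or.inr (Or.inl ⟨i, hi, h⟩)))
        · exact Or.inl (Or.inl (Or.inr (Or.inr ⟨i, hi, h⟩)))
      · rcases c2 with h|h|h
        · exact Or.inl (Or.inr (Or.inl ⟨i, hi, h⟩))
        · exact Or.inl (Or.inr (Or.inr (Or.inl ⟨i, hi, h⟩)))
        · exact Or.inl (Or.inr (Or.inr (Or.inr ⟨i, hi, h⟩)))
      · rcases c3 with h|h|h
        · exact Or.inr (Or.inl ⟨i, hi, h⟩)
        · exact Or.inr (Or.inr (Or.inl ⟨i, hi, h⟩))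
        · exact Or.inr (Or.inr (Or.inr ⟨i, hi, h⟩))
    · rintro (((⟨i, hi, h⟩|⟨i, hi, h⟩|⟨i, hi, h⟩)|(⟨i, hi, h⟩|⟨i, hi, h⟩|⟨i, hi, h⟩))|(⟨i, hi, h⟩|⟨i, hi, h⟩|⟨i, hi, h⟩)) <;>
        refine ⟨i, hi, ?_⟩ <;>
        first
        | (have := rank_le0_of _ (Or.inl h); omega)
        | (have := rank_le0_of _ (Or.inr (Or.inl h)); omega)
        | (have := rank_le0_of _ (Or.inr (Or.inr h)); omega)
        | (have := rank_le1_of _ (Or.inl h); omega)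
        | (have := rank_le1_of _ (Or.inr (Or.inl h)); omega)
        | (have := rank_le1_of _ (Or.inr (Or.inr h)); omega)
        | (have := rank_le2_of _ (Or.inl h); omega)
        | (have := rank_le2_of _ (Or.inr (Or.inl h)); omega)
        | (have := rank_le2_of _ (Or.inr (Or.inr h)); omega)
  have e1 : (["message", "subject", "inquiry"].any (fun name => fn.contains name) = true) ↔
      ("message" ∈ fn ∨ "subject" ∈ fn ∨ "inquiry" ∈ fn) := by simp
  have e2 : (["password", "confirm_password", "username"].any (fun name => fn.contains name) = true) ↔
      ("password" ∈ fn ∨ "confirm_password" ∈ fn ∨ "username" ∈ fn) := by simp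
  have e3 : (["search", "q", "query"].any (fun name => fn.contains name) = true) ↔
      ("search" ∈ fn ∨ "q" ∈ fn ∨ "query" ∈ fn) := by simp
  by_cases c1 : "message" ∈ fn ∨ "subject" ∈ fn ∨ "inquiry" ∈ fn
  · have hbv : b = 0 := by have := h0.mpr c1; omega
    rw [if_pos (e1.mpr c1), hbv]
    rfl
  · rw [if_neg (fun h => c1 (e1.mp h))]
    by_cases c2 : "password" ∈ fn ∨ "confirm_password" ∈ fn ∨ "username" ∈ fn
    · have hbv : b = 1 := by
        have hle := h1.mpr (Or.inr c2)
        have hgt : ¬ b ≤ 0 := fun h => c1 (h0.mp h)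
        omega
      rw [if_pos (e2.mpr c2), hbv]
      rfl
    · rw [if_neg (fun h => c2 (e2.mp h))]
      by_cases c3 : "search" ∈ fn ∨ "q" ∈ fn ∨ "query" ∈ fn
      · have hbv : b = 2 := by
          have hle := h2.mpr (Or.inr c3)
          have hgt : ¬ b ≤ 1 := fun h => (h1.mp h).elim c1 c2
          omega
        rw [if_pos (e3.mpr c3), hbv]
        rfl
      · have hgt : ¬ b ≤ 2 := fun h => ((h2.mp h).elim (fun h' => h'.elim c1 c2) c3)
        rw [if_neg (fun h => c3 (e3.mp h)), if_neg (by omega : ¬ b < 3)]
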